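-- pv_equiv track=rewrite | github.com/catherinearnett/morphscore | morphscore.py | morph_eval
-- ===== SOURCE A (Python) =====
-- def morph_eval(morphemes, tokens): #returns -1,0, 1
--     point = -1
--     if len(tokens) == 1:
--         point = 0
--     else:
--         segment_score = 0
--         for t in range(len(tokens)-1):
--             pt1 = ''.join(tokens[:t+1])
--             rest = ''.join(tokens[t+1:])
--             segments = [pt1, rest]
--             if segments == morphemes:
--                 segment_score += 1
--             else:
--                 segment_score += 0
--         if segment_score == 1:
--             point = 1
--         else:
--             point = -1
--     return point
-- ===== SOURCE B (Python) =====
-- def morph_eval(morphemes, tokens):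
--     # 0 for a single token; else 1 iff exactly one split boundary of the token
--     # sequence reconstructs the two reference morphemes, else -1.
--     if len(tokens) == 1:
--         return 0
--     if len(morphemes) != 2 or ''.join(tokens) != ''.join(morphemes):
--         return -1
--     target = len(morphemes[0])
--     acc = 0
--     count = 0
--     for tok in tokens[:-1]:
--         acc += len(tok)
--         if acc == target:
--             count += 1
--     return 1 if count == 1 else -1
-- ===== Notes on version B (the rewrite author's own statement) =====
-- stated objective: faster
-- what changed: Instead of rejoining both halves of the token list at every split point (O(n*L)), B joins once, checks the concatenation equals the two morphemes, and counts split points whose cumulative token length equals len(morphemes[0]) in a single O(n+L) pass.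
import Mathlib
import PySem

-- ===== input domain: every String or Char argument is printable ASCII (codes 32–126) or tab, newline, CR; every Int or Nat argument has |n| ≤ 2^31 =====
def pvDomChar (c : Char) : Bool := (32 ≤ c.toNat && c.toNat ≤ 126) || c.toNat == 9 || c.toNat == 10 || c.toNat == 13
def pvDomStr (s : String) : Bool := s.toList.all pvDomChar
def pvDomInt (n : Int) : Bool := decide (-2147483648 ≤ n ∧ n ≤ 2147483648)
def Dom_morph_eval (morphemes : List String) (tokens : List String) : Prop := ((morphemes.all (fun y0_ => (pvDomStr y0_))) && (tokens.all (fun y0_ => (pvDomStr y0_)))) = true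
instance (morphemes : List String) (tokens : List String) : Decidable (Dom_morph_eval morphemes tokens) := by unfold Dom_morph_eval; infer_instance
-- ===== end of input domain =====

-- B joins the tokens once and counts split points by cumulative token length (one O(n+L) pass)
-- instead of A's rejoining of both halves at every split point (O(n·L)); objective: faster.
-- ===== PORT A =====
def morph_eval (morphemes : List String) (tokens : List String) : Int :=
  if PySem.List.len tokens = 1 then 0
  else
    let segment_score : Int :=
      (PySem.List.pyRange 0 (PySem.List.len tokens - 1) 1).foldl
        (fun acc t =>
          let pt1 := PySem.Str.join "" (PySem.List.slice tokens none (some (t + 1)))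
          let rest := PySem.Str.join "" (PySem.List.slice tokens (some (t + 1)) none)
          if [pt1, rest] = morphemes then acc + 1 else acc + 0) 0
    if segment_score = 1 then 1 else -1

-- ===== PORT B =====
def morph_eval_alt (morphemes : List String) (tokens : List String) : Int :=
  if PySem.List.len tokens = 1 then 0
  else if PySem.List.len morphemes ≠ 2 ∨ PySem.Str.join "" tokens ≠ PySem.Str.join "" morphemes then -1
  else
    -- morphemes[0]: safe, the previous branch guarantees len(morphemes) = 2
    let target := PySem.Str.len (morphemes.headD "")
    let st :=
      (PySem.List.slice tokens none (some (-1))).foldl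
        (fun (st : Int × Int) tok =>
          let acc := st.1 + PySem.Str.len tok
          (acc, if acc = target then st.2 + 1 else st.2)) (0, 0)
    if st.2 = 1 then 1 else -1

-- ===== PRECONDITION & SPEC =====
def Spec_morph_eval (morphemes : List String) (tokens : List String) (out : Int) : Prop := out = morph_eval_alt morphemes tokens
instance (morphemes : List String) (tokens : List String) (out : Int) : Decidable (Spec_morph_eval morphemes tokens out) := by unfold Spec_morph_eval; infer_instance

-- ===== CLAIM (what is proved, stated in full; the proofs are below) =====
def Claim_equal_morph_eval : Prop := ∀ (morphemes : List String) (tokens : List String), Dom_morph_eval morphemes tokens → Spec_morph_eval morphemes tokens (morph_eval morphemes tokens)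

-- ===== LEMMAS AND PROOFS =====

-- total length (in characters) of a list of strings
def pvSumLen (ys : List String) : Nat := (ys.map (fun s => s.toList.length)).sum

-- value of B's counting loop, as a structural recursion
def pvCnt (target a : Int) : List String → Int
  | [] => 0
  | h :: t => (if a + PySem.Str.len h = target then 1 else 0) + pvCnt target (a + PySem.Str.len h) t

lemma pvJoin_nil_flatten (xs : List (List Char)) : PySem.Chars.join [] xs = xs.flatten := by
  simp [PySem.Chars.join, List.intercalate]
  induction xs with
  | nil => simp
  | cons h t ih => cases t <;> simp_all [List.intersperse]

lemma pvJoinS_toList (xs : List String) :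
    (PySem.Str.join "" xs).toList = (xs.map String.toList).flatten := by
  rw [PySem.Str.toList_join]
  have : ("" : String).toList = [] := rfl
  rw [this, pvJoin_nil_flatten]

lemma pvFoldB (ys : List String) (target : Int) (a c : Int) :
    (ys.foldl
      (fun (st : Int × Int) tok =>
        let acc := st.1 + PySem.Str.len tok
        (acc, if acc = target then st.2 + 1 else st.2)) (a, c)).2
      = c + pvCnt target a ys := by
  induction ys generalizing a c with
  | nil => simp [pvCnt]
  | cons h t ih => simp only [List.foldl_cons, pvCnt, ih]; split_ifs <;> ring

lemma pvCnt_eq_countP (target : Int) (ys : List String) (a : Int) :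
    pvCnt target a ys
      = ((List.range ys.length).countP
          (fun i => decide (a + (pvSumLen (ys.take (i + 1)) : Int) = target)) : Nat) := by
  induction ys generalizing a with
  | nil => simp [pvCnt]
  | cons h t ih =>
    rw [pvCnt, ih (a + PySem.Str.len h)]
    simp only [List.length_cons, List.range_succ_eq_map, List.countP_cons, List.countP_map]
    have hlen : PySem.Str.len h = (h.toList.length : Int) := PySem.Str.len_eq h
    have h0 : (decide (a + (pvSumLen ((h :: t).take (0 + 1)) : Int) = target))
        = decide (a + PySem.Str.len h = target) := by
      simp [pvSumLen, PySem.Str.len_eq]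
    have hsucc : ∀ i : Nat,
        (decide (a + (pvSumLen ((h :: t).take (Nat.succ i + 1)) : Int) = target))
        = decide ((a + PySem.Str.len h) + (pvSumLen (t.take (i + 1)) : Int) = target) := by
      intro i
      simp [pvSumLen, PySem.Str.len_eq]
      constructor <;> intro hh <;> push_cast at * <;> linarith
    have : (fun i => decide (a + (pvSumLen ((h :: t).take (i + 1)) : Int) = target)) ∘ Nat.succ
        = fun i => decide ((a + PySem.Str.len h) + (pvSumLen (t.take (i + 1)) : Int) = target) := by
      funext i; exact hsucc i
    rw [this, h0]
    by_cases hc : a + PySem.Str.len h = target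
    · rw [if_pos hc, if_pos (by simpa [PySem.Str.len_eq] using hc)]
      push_cast
      ring
    · rw [if_neg hc, if_neg (by simpa [PySem.Str.len_eq] using hc)]
      push_cast
      ring

-- A's loop as a countP over the split positions (tokens nonempty)
lemma pvScoreA (morphemes : List String) (tokens : List String) (h : tokens ≠ []) :
    (PySem.List.pyRange 0 (PySem.List.len tokens - 1) 1).foldl
        (fun acc t =>
          let pt1 := PySem.Str.join "" (PySem.List.slice tokens none (some (t + 1)))
          let rest := PySem.Str.join "" (PySem.List.slice tokens (some (t + 1)) none)
          if [pt1, rest] = morphemes then acc + 1 else acc + 0) 0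
      = ((List.range (tokens.length - 1)).countP
          (fun i => decide ([PySem.Str.join "" (tokens.take (i + 1)),
                             PySem.Str.join "" (tokens.drop (i + 1))] = morphemes)) : Int) := by
  have h1 : PySem.List.len tokens - 1 = ((tokens.length - 1 : Nat) : Int) := by
    rw [PySem.List.len_eq]
    have : tokens.length ≠ 0 := fun hh => h (List.length_eq_zero_iff.mp hh)
    omega
  rw [h1, PySem.List.pyRange_zero_natCast, List.foldl_map]
  have hb : (fun (acc : Int) (i : Nat) =>
          let pt1 := PySem.Str.join "" (PySem.List.slice tokens none (some ((i : Int) + 1)))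
          let rest := PySem.Str.join "" (PySem.List.slice tokens (some ((i : Int) + 1)) none)
          if [pt1, rest] = morphemes then acc + 1 else acc + 0)
      = fun acc i =>
          if (fun i => decide ([PySem.Str.join "" (tokens.take (i + 1)),
                             PySem.Str.join "" (tokens.drop (i + 1))] = morphemes)) i = true
          then acc + 1 else acc := by
    funext acc i
    have hcast : ((i : Int) + 1) = ((i + 1 : Nat) : Int) := by push_cast; ring
    simp only [hcast, PySem.List.slice_to_natCast, PySem.List.slice_from_natCast]
    by_cases hc : [PySem.Str.join "" (tokens.take (i + 1)),
        PySem.Str.join "" (tokens.drop (i + 1))] = morphemes <;> simp [hc]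
  refine Eq.trans (congrArg (fun f : Int → Nat → Int => List.foldl f (0 : Int) (List.range (tokens.length - 1))) hb) ?_
  beta_reduce
  rw [PySem.List.foldl_count_if]
  simp

-- ===== VERDICT (by name: the statement is the Claim_ definition above) =====
-- characterisation of B's branch data: splitting lemmas used by the verdict proof
lemma pvFlatten_split (tokens : List String) (k : Nat) :
    ((tokens.take k).map String.toList).flatten ++ ((tokens.drop k).map String.toList).flatten
      = (tokens.map String.toList).flatten := by
  rw [← List.flatten_append, ← List.map_append, List.take_append_drop]

lemma pvSumLen_eq (ys : List String) : pvSumLen ys = ((ys.map String.toList).flatten).length := by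
  simp [pvSumLen, List.length_flatten, Function.comp_def]

theorem morph_eval_spec : Claim_equal_morph_eval := by
  intro morphemes tokens _
  show morph_eval morphemes tokens = morph_eval_alt morphemes tokens
  unfold morph_eval morph_eval_alt
  by_cases h1 : PySem.List.len tokens = 1
  · have hl : tokens.length = 1 := by rw [PySem.List.len_eq] at h1; exact_mod_cast h1
    simp [hl]
  rcases eq_or_ne tokens [] with hnil | hne
  · subst hnil
    simp only [h1, if_false]
    have hr : PySem.List.pyRange 0 (PySem.List.len ([] : List String) - 1) 1 = [] := rfl
    rw [hr]
    simp [PySem.List.slice_to_neg_one]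
  -- tokens nonempty, length ≠ 1
  simp only [h1, if_false]
  rw [pvScoreA morphemes tokens hne]
  rw [PySem.List.slice_to_neg_one, pvFoldB, pvCnt_eq_countP]
  set m := tokens.length - 1 with hm
  have hdl : tokens.dropLast.length = m := by simp [List.length_dropLast, hm]
  rw [hdl]
  by_cases hg : PySem.List.len morphemes ≠ 2 ∨
      PySem.Str.join "" tokens ≠ PySem.Str.join "" morphemes
  · -- guard true: B returns -1; A's count is 0
    have hz : (List.range m).countP
        (fun i => decide ([PySem.Str.join "" (tokens.take (i + 1)),
                           PySem.Str.join "" (tokens.drop (i + 1))] = morphemes)) = 0 := by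
      rw [List.countP_eq_zero]
      intro i _
      simp only [decide_eq_true_eq]
      intro hc
      have hms2 : PySem.List.len morphemes = 2 := by
        rw [← hc, PySem.List.len_eq]; rfl
      have hjoin : PySem.Str.join "" tokens = PySem.Str.join "" morphemes := by
        apply String.toList_inj.mp
        rw [← hc, pvJoinS_toList, pvJoinS_toList]
        simp only [List.map_cons, List.map_nil, List.flatten_cons, List.flatten_nil,
          List.append_nil]
        rw [pvJoinS_toList, pvJoinS_toList, pvFlatten_split]
      rcases hg with hg | hg
      · exact hg hms2
      · exact hg hjoin
    rw [hz]
    rw [if_pos hg]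
    simp
  · -- guard false: morphemes = [m0, m1] and the joins agree
    rw [not_or, not_not, not_not] at hg
    obtain ⟨hms2, hjoin⟩ := hg
    simp only [if_neg (by rw [not_or, not_not, not_not]; exact ⟨hms2, hjoin⟩ : ¬(PySem.List.len morphemes ≠ 2 ∨
      PySem.Str.join "" tokens ≠ PySem.Str.join "" morphemes))]
    obtain ⟨m0, m1, hms⟩ : ∃ m0 m1, morphemes = [m0, m1] := by
      rw [PySem.List.len_eq] at hms2
      have : morphemes.length = 2 := by exact_mod_cast hms2
      match morphemes, this with
      | [a, b], _ => exact ⟨a, b, rfl⟩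
    subst hms
    have hJ : (tokens.map String.toList).flatten = m0.toList ++ m1.toList := by
      have := congrArg String.toList hjoin
      rw [pvJoinS_toList, pvJoinS_toList] at this
      simpa using this
    have hcong : ∀ i ∈ List.range m,
        (decide ([PySem.Str.join "" (tokens.take (i + 1)),
                  PySem.Str.join "" (tokens.drop (i + 1))] = [m0, m1])) = true ↔
        (decide ((0 : Int) + (pvSumLen (tokens.dropLast.take (i + 1)) : Int)
            = PySem.Str.len (([m0, m1].headD ""))) ) = true := by
      intro i hi
      have him : i < m := List.mem_range.mp hi
      have htk : tokens.dropLast.take (i + 1) = tokens.take (i + 1) := by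
        rw [List.dropLast_eq_take, List.take_take]
        congr 1
        omega
      simp only [decide_eq_true_eq, List.headD_cons, htk, zero_add, PySem.Str.len_eq]
      set p := ((tokens.take (i + 1)).map String.toList).flatten with hp
      set r := ((tokens.drop (i + 1)).map String.toList).flatten with hr
      have hpr : p ++ r = m0.toList ++ m1.toList := by rw [hp, hr, pvFlatten_split, hJ]
      have hplen : (pvSumLen (tokens.take (i + 1)) : Int) = (p.length : Int) := by
        rw [pvSumLen_eq]
      rw [hplen]
      constructor
      · intro hc
        have hc0 : PySem.Str.join "" (tokens.take (i + 1)) = m0 := by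
          injection hc with hh _
        have : p = m0.toList := by rw [hp, ← pvJoinS_toList, hc0]
        rw [this]
      · intro hlen
        have hlen' : p.length = m0.toList.length := by exact_mod_cast hlen
        obtain ⟨hpe, hre⟩ := List.append_inj hpr hlen'
        have h0 : PySem.Str.join "" (tokens.take (i + 1)) = m0 :=
          String.toList_inj.mp (by rw [pvJoinS_toList, ← hp, hpe])
        have hrgoal : PySem.Str.join "" (tokens.drop (i + 1)) = m1 :=
          String.toList_inj.mp (by rw [pvJoinS_toList, ← hr, hre])
        rw [h0, hrgoal]
    rw [List.countP_congr hcong, zero_add]
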